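-- pv_equiv track=rewrite | github.com/aleksioprime/sk-aisb | waste/waste_client_pc.py | should_send_command
-- ===== SOURCE A (Python) =====
-- from collections import deque
--
-- REQUIRED_STREAK = 5
--
-- REQUIRED_STREAK_UNKNOWN = 8
--
-- UNKNOWN_COMMAND = "section_2"
--
-- def should_send_command(history: deque[str | None], command: str | None) -> bool:
--     """Проверяет, достаточно ли кадров подряд подтверждают одну команду."""
--     if not command:
--         return False
--
--     # Для неизвестного объекта (контурная детекция) требуется больше
--     # подтверждающих кадров, чтобы снизить ложные срабатывания.
--     required = REQUIRED_STREAK_UNKNOWN if command == UNKNOWN_COMMAND else REQUIRED_STREAK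
--
--     streak = 0
--     for item in reversed(history):
--         if item == command:
--             streak += 1
--         else:
--             break
--
--     return streak >= required
-- ===== SOURCE B (Python) =====
-- REQUIRED_STREAK = 5
-- REQUIRED_STREAK_UNKNOWN = 8
-- UNKNOWN_COMMAND = "section_2"
--
-- def should_send_command(history, command):
--     if not command:
--         return False
--     required = REQUIRED_STREAK_UNKNOWN if command == UNKNOWN_COMMAND else REQUIRED_STREAK
--     tail = list(history)[-required:]
--     return len(tail) == required and all(item == command for item in tail)
-- ===== Notes on version B (the rewrite author's own statement) =====
-- stated objective: simpler
-- what changed: Replaces the reverse-scan streak counter with a fixed-size suffix slice plus a length check and a uniform all-equal test.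
import Mathlib
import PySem

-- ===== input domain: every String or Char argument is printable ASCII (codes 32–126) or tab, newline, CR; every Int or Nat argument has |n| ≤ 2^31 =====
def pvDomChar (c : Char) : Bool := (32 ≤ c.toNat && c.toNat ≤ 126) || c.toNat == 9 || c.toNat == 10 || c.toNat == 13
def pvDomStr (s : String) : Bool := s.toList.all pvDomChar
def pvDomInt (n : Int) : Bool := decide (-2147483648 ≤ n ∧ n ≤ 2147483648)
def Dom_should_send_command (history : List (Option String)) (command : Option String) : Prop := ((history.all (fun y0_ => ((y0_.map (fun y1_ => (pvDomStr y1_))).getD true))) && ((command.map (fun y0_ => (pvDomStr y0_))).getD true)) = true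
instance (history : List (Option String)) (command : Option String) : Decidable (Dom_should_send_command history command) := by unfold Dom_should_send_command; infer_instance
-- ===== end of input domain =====

-- B replaces A's reverse-scan streak counter with a suffix slice of fixed size plus a length check and an all-equal test (objective: simpler).


-- ===== PORT A =====
-- streak counter: counts leading matches of the reversed history, stopping at the first mismatch (Python's `break`)
def pvStreak (xs : List (Option String)) (c : Option String) : Nat :=
  match xs with
  | [] => 0
  | x :: rest => if x = c then pvStreak rest c + 1 else 0

def should_send_command (history : List (Option String)) (command : Option String) : Bool :=
  match command with
  | none => false
  | some c =>
    if c = "" then false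
    else
      let required : Nat := if c = "section_2" then 8 else 5
      let streak := pvStreak history.reverse (some c)
      decide (streak ≥ required)

-- ===== PORT B =====
def should_send_command_alt (history : List (Option String)) (command : Option String) : Bool :=
  match command with
  | none => false
  | some c =>
    if c = "" then false
    else
      let required : Nat := if c = "section_2" then 8 else 5
      let tail := PySem.List.slice history (some (-(required : Int))) none
      decide (tail.length = required) && tail.all (fun item => item == some c)

-- ===== PRECONDITION & SPEC =====
def Spec_should_send_command (history : List (Option String)) (command : Option String) (out : Bool) : Prop := out = should_send_command_alt history command
instance (history : List (Option String)) (command : Option String) (out : Bool) : Decidable (Spec_should_send_command history command out) := by unfold Spec_should_send_command; infer_instance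

-- ===== CLAIM (what is proved, stated in full; the proofs are below) =====
def Claim_equal_should_send_command : Prop := ∀ (history : List (Option String)) (command : Option String), Dom_should_send_command history command → Spec_should_send_command history command (should_send_command history command)

-- ===== LEMMAS AND PROOFS =====
-- r ≤ streak  ↔  the first r elements exist and all equal c
theorem pvStreak_ge (c : Option String) (r : Nat) : ∀ (xs : List (Option String)),
    (r ≤ pvStreak xs c) ↔ ((xs.take r).length = r ∧ ∀ y ∈ xs.take r, y = c) := by
  induction r with
  | zero => intro xs; simp
  | succ r ih =>
    intro xs
    cases xs with
    | nil => simp [pvStreak]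
    | cons x rest =>
      by_cases h : x = c
      · simp only [pvStreak, if_pos h, List.take_succ_cons, List.length_cons,
          List.mem_cons, Nat.succ_le_succ_iff, ih rest, Nat.add_right_cancel_iff]
        constructor
        · rintro ⟨hl, hall⟩
          refine ⟨hl, ?_⟩
          rintro y (rfl | hy)
          · exact h
          · exact hall y hy
        · rintro ⟨hl, hall⟩
          exact ⟨hl, fun y hy => hall y (Or.inr hy)⟩
      · simp only [pvStreak, if_neg h, List.take_succ_cons, List.length_cons,
          List.mem_cons]
        constructor
        · omega
        · rintro ⟨-, hall⟩
          exact absurd (hall x (Or.inl rfl)) h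

theorem pv_main (history : List (Option String)) (c : Option String) (r : Nat) (hr : 0 < r) :
    decide (r ≤ pvStreak history.reverse c)
      = (decide ((PySem.List.slice history (some (-(r : Int))) none).length = r)
          && (PySem.List.slice history (some (-(r : Int))) none).all (fun item => item == c)) := by
  rw [PySem.List.slice_from_neg_natCast history r hr]
  have htake : history.reverse.take r = (history.drop (history.length - r)).reverse := by
    conv_lhs => rw [← List.reverse_reverse (history.reverse.take r)]
    rw [List.reverse_take, List.reverse_reverse, List.length_reverse]
  rw [Bool.eq_iff_iff]
  simp only [decide_eq_true_eq, Bool.and_eq_true, List.all_eq_true, beq_iff_eq,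
    pvStreak_ge, htake, List.length_reverse, List.mem_reverse]

-- ===== VERDICT (by name: the statement is the Claim_ definition above) =====
theorem should_send_command_spec : Claim_equal_should_send_command := by
  intro history command _
  unfold Spec_should_send_command should_send_command should_send_command_alt
  cases command with
  | none => rfl
  | some c =>
    by_cases h : c = ""
    · simp [h]
    · simp only [if_neg h]
      by_cases hc : c = "section_2"
      · simp only [if_pos hc]; exact pv_main history (some c) 8 (by omega)
      · simp only [if_neg hc]; exact pv_main history (some c) 5 (by omega)
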